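-- pv_equiv track=rewrite | github.com/kcyu2014/nas-landmarkreg | nasws/cnn/search_space/nasbench101/nasbench_search_space.py | permunate_ops_all
-- ===== SOURCE A (Python) =====
-- def permunate_ops_all(n, OPS):
--     if n == 0:
--         yield []
--     elif n == 1:
--         for o in OPS:
--             yield [o,]
--     else:
--         for o in OPS:
--             for rest_ops in permunate_ops_all(n-1, OPS):
--                 yield [o,] + rest_ops
-- ===== SOURCE B (Python) =====
-- def permunate_ops_all(n, OPS):
--     partials = [[]]
--     for _ in range(n):
--         partials = [p + [o] for p in partials for o in OPS]
--     for seq in partials: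
--         yield seq
-- ===== Notes on version B (the rewrite author's own statement) =====
-- stated objective: alternative
-- what changed: Replaces the recursive generator (which re-enumerates the (n-1)-product once per leading op) by an iterative builder: start from [[]] and n times rebuild the list of partial sequences by appending each op, then yield the completed sequences.
-- outside the precondition, e.g. on permunate_ops_all(-1, []): A returns [], B returns [[]]
import Mathlib
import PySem

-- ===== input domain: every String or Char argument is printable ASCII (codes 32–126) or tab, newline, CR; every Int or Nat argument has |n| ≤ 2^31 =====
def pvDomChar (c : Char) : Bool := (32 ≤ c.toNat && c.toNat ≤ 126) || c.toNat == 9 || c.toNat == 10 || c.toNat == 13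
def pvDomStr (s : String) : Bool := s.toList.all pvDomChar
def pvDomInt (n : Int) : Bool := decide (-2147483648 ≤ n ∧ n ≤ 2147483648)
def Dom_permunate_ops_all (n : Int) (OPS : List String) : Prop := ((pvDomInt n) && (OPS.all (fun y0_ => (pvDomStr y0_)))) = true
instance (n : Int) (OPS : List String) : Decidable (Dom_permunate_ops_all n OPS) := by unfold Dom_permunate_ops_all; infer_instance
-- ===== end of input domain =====

-- B replaces A's recursive generator by an iterative builder over range(n); objective: alternative decomposition.


-- ===== PORT A =====
-- A's recursion is on n; for n ≥ 0 (all of Pre_) the recursion depth is n, modelled by Nat recursion on n.toNat.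
def permAGo (k : Nat) (OPS : List String) : List (List String) :=
  match k with
  | 0 => [[]]
  | 1 => OPS.map (fun o => [o])
  | Nat.succ m => OPS.flatMap (fun o => (permAGo m OPS).map (fun rest => o :: rest))

def permunate_ops_all (n : Int) (OPS : List String) : List (List String) :=
  permAGo n.toNat OPS

-- ===== PORT B =====
def permBStep (OPS : List String) (partials : List (List String)) : List (List String) :=
  partials.flatMap (fun p => OPS.map (fun o => p ++ [o]))

def permunate_ops_all_alt (n : Int) (OPS : List String) : List (List String) :=
  (PySem.List.pyRange 0 n 1).foldl (fun partials _ => permBStep OPS partials) [[]]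

-- ===== PRECONDITION & SPEC =====
-- Pre_ excludes negative n: there A either recurses forever (RecursionError, OPS nonempty) or its
-- empty yield on OPS = [] is an accident of the recursion hitting an empty loop.
def Pre_permunate_ops_all (n : Int) (OPS : List String) : Prop := 0 ≤ n
instance (n : Int) (OPS : List String) : Decidable (Pre_permunate_ops_all n OPS) := by unfold Pre_permunate_ops_all; infer_instance
def pvWitness_permunate_ops_all : Int × List String := (2, ["conv3x3", "maxpool"])
def Spec_permunate_ops_all (n : Int) (OPS : List String) (out : List (List String)) : Prop := out = permunate_ops_all_alt n OPS
instance (n : Int) (OPS : List String) (out : List (List String)) : Decidable (Spec_permunate_ops_all n OPS out) := by unfold Spec_permunate_ops_all; infer_instance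

-- ===== CLAIM (what is proved, stated in full; the proofs are below) =====
def Claim_equal_permunate_ops_all : Prop := ∀ (n : Int) (OPS : List String), Dom_permunate_ops_all n OPS → Pre_permunate_ops_all n OPS → Spec_permunate_ops_all n OPS (permunate_ops_all n OPS)

-- ===== LEMMAS AND PROOFS =====
def permBIter (k : Nat) (OPS : List String) : List (List String) :=
  match k with
  | 0 => [[]]
  | Nat.succ m => permBStep OPS (permBIter m OPS)

theorem permAGo_succ_succ (m : Nat) (OPS : List String) :
    permAGo (m + 2) OPS = OPS.flatMap (fun o => (permAGo (m + 1) OPS).map (fun rest => o :: rest)) := rfl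

-- step (append at the end) commutes with prepending each op at the front
theorem step_append (OPS : List String) (A B : List (List String)) :
    permBStep OPS (A ++ B) = permBStep OPS A ++ permBStep OPS B := by
  simp [permBStep]

theorem step_map_cons (OPS : List String) (o : String) (L : List (List String)) :
    permBStep OPS (L.map (fun rest => o :: rest))
      = (permBStep OPS L).map (fun rest => o :: rest) := by
  simp [permBStep, List.flatMap_map, List.map_flatMap, List.map_map, Function.comp_def]

theorem step_comm' (OPS l : List String) (L : List (List String)) :
    permBStep OPS (l.flatMap (fun o => L.map (fun rest => o :: rest)))
      = l.flatMap (fun o => (permBStep OPS L).map (fun rest => o :: rest)) := by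
  induction l with
  | nil => simp [permBStep]
  | cons x xs ih =>
      simp only [List.flatMap_cons]
      rw [step_append, step_map_cons, ih]

theorem step_comm (OPS : List String) (L : List (List String)) :
    permBStep OPS (OPS.flatMap (fun o => L.map (fun rest => o :: rest)))
      = OPS.flatMap (fun o => (permBStep OPS L).map (fun rest => o :: rest)) :=
  step_comm' OPS OPS L

-- appending a layer at the end equals prepending a layer at the front, for iterated products
theorem step_eq_prepend (k : Nat) (OPS : List String) :
    permBStep OPS (permBIter k OPS)
      = OPS.flatMap (fun o => (permBIter k OPS).map (fun rest => o :: rest)) := by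
  induction k with
  | zero =>
      show permBStep OPS [[]] = OPS.flatMap (fun o => [[o]])
      induction OPS with
      | nil => rfl
      | cons x xs ihx => simpa [permBStep] using ihx
  | succ m ih =>
      calc permBStep OPS (permBIter (m+1) OPS)
          = permBStep OPS (permBStep OPS (permBIter m OPS)) := rfl
        _ = permBStep OPS (OPS.flatMap (fun o => (permBIter m OPS).map (fun rest => o :: rest))) := by rw [ih]
        _ = OPS.flatMap (fun o => (permBStep OPS (permBIter m OPS)).map (fun rest => o :: rest)) := step_comm OPS _
        _ = OPS.flatMap (fun o => (permBIter (m+1) OPS).map (fun rest => o :: rest)) := rfl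

theorem permAGo_eq_permBIter (k : Nat) (OPS : List String) : permAGo k OPS = permBIter k OPS := by
  induction k with
  | zero => rfl
  | succ m ih =>
      cases m with
      | zero => simp [permAGo, permBIter, permBStep]
      | succ m' =>
          rw [permAGo_succ_succ, ih, ← step_eq_prepend]
          rfl

theorem foldl_const_step (L : List Int) (OPS : List String) (init : List (List String)) :
    L.foldl (fun partials _ => permBStep OPS partials) init
      = Nat.rec init (fun _ acc => permBStep OPS acc) L.length := by
  induction L generalizing init with
  | nil => rfl
  | cons x xs ih =>
      simp only [List.foldl_cons, List.length_cons, ih]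
      induction xs.length with
      | zero => rfl
      | succ m ihm => simpa using congrArg (permBStep OPS) ihm

theorem permBIter_eq_rec (k : Nat) (OPS : List String) :
    permBIter k OPS = Nat.rec [[]] (fun _ acc => permBStep OPS acc) k := by
  induction k with
  | zero => rfl
  | succ m ih => simpa [permBIter] using congrArg (permBStep OPS) ih

-- ===== VERDICT (by name: the statement is the Claim_ definition above) =====
theorem permunate_ops_all_spec : Claim_equal_permunate_ops_all := by
  intro n OPS _ hpre
  unfold Spec_permunate_ops_all permunate_ops_all permunate_ops_all_alt
  rw [foldl_const_step, permAGo_eq_permBIter, permBIter_eq_rec]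
  have : (PySem.List.pyRange 0 n 1).length = n.toNat := by
    rw [PySem.List.length_pyRange_one]; omega
  rw [this]
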